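-- pv_equiv track=rewrite | github.com/Walsxd/Proyecto | src/algoritmos.py | es_arbol
-- ===== SOURCE A (Python) =====
-- from collections import deque
--
-- def bfs_componentes(graph, start, visitados):
--     """
--     Realiza un BFS para encontrar todos los nodos alcanzables desde start.
--     Retorna un conjunto de nodos que forman la componente conexa.
--     """
--     componente = set()
--     cola = deque([start])
--     visitados.add(start)
--     componente.add(start)
--
--     while cola:
--         nodo = cola.popleft()
--         vecinos = graph.get(nodo, [])
--         for vecino, _ in vecinos:
--             if vecino not in visitados:
--                 visitados.add(vecino)
--                 componente.add(vecino)
--                 cola.append(vecino)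
--     return componente
--
-- def es_arbol(graph, es_dirigido=False):
--     """
--     Determina si un grafo es un árbol.
--     Condiciones:
--     1. No dirigido (aunque se puede adaptar, la definición clásica es para no dirigidos).
--     2. Conexo.
--     3. Sin ciclos (implícito si es conexo y |E| = |V| - 1).
--     4. |E| = |V| - 1.
--     """
--     if es_dirigido:
--         return False, "Los árboles (en este contexto) son grafos no dirigidos."
--
--     nodos = list(graph.keys())
--     if not nodos:
--         return True, "Grafo vacío es trivialmente un árbol (o bosque vacío)."
--
--     # Verificar conectividad
--     visitados = set()
--     comp = bfs_componentes(graph, nodos[0], visitados)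
--     if len(comp) != len(nodos):
--         return False, "El grafo no es conexo."
--
--     # Contar aristas
--     num_aristas = 0
--     for u in graph:
--         num_aristas += len(graph[u])
--
--     # En representación de lista de adyacencia para no dirigido, cada arista aparece 2 veces
--     num_aristas //= 2
--
--     if num_aristas != len(nodos) - 1:
--         return False, f"Número de aristas incorrecto. Tiene {num_aristas}, debería tener {len(nodos) - 1}."
--
--     return True, "Es un árbol."
-- ===== SOURCE B (Python) =====
-- def es_arbol(graph, es_dirigido=False):
--     if es_dirigido:
--         return False, "Los árboles (en este contexto) son grafos no dirigidos."
--
--     nodos = list(graph.keys())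
--     if not nodos:
--         return True, "Grafo vacío es trivialmente un árbol (o bosque vacío)."
--
--     # Reachable set from nodos[0] by fixed-point saturation: repeatedly add the
--     # out-neighbours of the current set until it stops growing (no queue, no
--     # recursion, no visited bookkeeping).
--     comp = {nodos[0]}
--     while True:
--         nxt = set(comp)
--         for u in comp:
--             for v, _ in graph.get(u, []):
--                 nxt.add(v)
--         if len(nxt) == len(comp):
--             break
--         comp = nxt
--
--     if len(comp) != len(nodos):
--         return False, "El grafo no es conexo."
--
--     num_aristas = sum(len(graph[u]) for u in graph) // 2
--
--     if num_aristas != len(nodos) - 1: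
--         return False, f"Número de aristas incorrecto. Tiene {num_aristas}, debería tener {len(nodos) - 1}."
--
--     return True, "Es un árbol."
-- ===== Notes on version B (the rewrite author's own statement) =====
-- stated objective: alternative
-- what changed: A's deque-based BFS connectivity check is replaced by fixed-point saturation: starting from {nodos[0]}, repeatedly add all out-neighbours of the current set until it stops growing (no queue, no visited set); A's edge-count accumulator loop becomes a sum of a generator.
import Mathlib
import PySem

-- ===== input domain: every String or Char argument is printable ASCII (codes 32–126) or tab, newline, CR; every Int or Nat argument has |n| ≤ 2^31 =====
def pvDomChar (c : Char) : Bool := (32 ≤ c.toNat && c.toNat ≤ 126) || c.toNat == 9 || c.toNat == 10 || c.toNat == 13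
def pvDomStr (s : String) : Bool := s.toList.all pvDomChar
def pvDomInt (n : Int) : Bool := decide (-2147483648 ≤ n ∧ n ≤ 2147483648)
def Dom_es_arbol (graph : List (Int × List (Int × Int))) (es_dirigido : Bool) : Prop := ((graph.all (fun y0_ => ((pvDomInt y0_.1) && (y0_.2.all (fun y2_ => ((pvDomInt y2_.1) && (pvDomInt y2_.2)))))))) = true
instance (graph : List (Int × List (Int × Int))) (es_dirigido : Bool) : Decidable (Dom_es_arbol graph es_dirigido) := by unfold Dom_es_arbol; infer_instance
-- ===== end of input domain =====

-- B replaces A's deque-based BFS by fixed-point saturation of the reachable set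
-- (repeatedly add out-neighbours until the set stops growing); alternative, not faster.

-- ===== PORT A =====

-- graph.get(nodo, [])
def pvAdj (d : PySem.Dict Int (List (Int × Int))) (n : Int) : List (Int × Int) :=
  PySem.Dict.getD d n []

-- Σ len(graph[u]) occurrences of neighbour entries; its length bounds how many distinct
-- nodes a traversal can ever add, so it sizes the fuel of both loops below.
def pvUg (d : PySem.Dict Int (List (Int × Int))) : List Int :=
  d.items.flatMap (fun p => p.2.map Prod.fst)

def pvFuel (d : PySem.Dict Int (List (Int × Int))) : Nat := (pvUg d).length + 1

-- the 'while cola:' loop of bfs_componentes; state = (cola, visitados, componente).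
-- The Nat argument is a fuel guard only: with fuel pvFuel d the queue always empties
-- before fuel runs out (proved below), so the 0-case is never reached.
def bfsGo (d : PySem.Dict Int (List (Int × Int))) :
    Nat → List Int → PySem.Set Int → PySem.Set Int → PySem.Set Int × PySem.Set Int
  | 0, _, vis, comp => (vis, comp)
  | f + 1, q, vis, comp =>
    match q with
    | [] => (vis, comp)
    | n :: rest =>
      let st := (pvAdj d n).foldl
        (fun st p =>
          if PySem.Set.contains st.2.1 p.1 then st
          else (st.1 ++ [p.1], PySem.Set.add st.2.1 p.1, PySem.Set.add st.2.2 p.1))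
        (rest, vis, comp)
      bfsGo d f st.1 st.2.1 st.2.2

-- bfs_componentes: returns componente (es_arbol discards the mutated visitados)
def bfs_componentes (d : PySem.Dict Int (List (Int × Int))) (start : Int)
    (visitados : PySem.Set Int) : PySem.Set Int :=
  let visitados := PySem.Set.add visitados start
  let componente := PySem.Set.add PySem.Set.empty start
  (bfsGo d (pvFuel d) [start] visitados componente).2

def es_arbol (graph : List (Int × List (Int × Int))) (es_dirigido : Bool) : Bool × String :=
  if es_dirigido then (false, "Los árboles (en este contexto) son grafos no dirigidos.")
  else
    let d := PySem.Dict.ofList graph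
    let nodos := PySem.Dict.keys d
    match nodos with
    | [] => (true, "Grafo vacío es trivialmente un árbol (o bosque vacío).")
    | n0 :: rest =>
      let nodos := n0 :: rest
      let comp := bfs_componentes d n0 PySem.Set.empty
      if comp.length ≠ nodos.length then (false, "El grafo no es conexo.")
      else
        -- num_aristas: for u in graph: num += len(graph[u]); then //= 2
        let num0 : Int := nodos.foldl (fun acc u => acc + ((pvAdj d u).length : Int)) 0
        let num := PySem.Int.floordiv num0 2
        if num ≠ (nodos.length : Int) - 1 then
          (false, "Número de aristas incorrecto. Tiene " ++ PySem.Int.toStr num ++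
            ", debería tener " ++ PySem.Int.toStr ((nodos.length : Int) - 1) ++ ".")
        else (true, "Es un árbol.")

-- ===== PORT B =====

-- one saturation round: nxt = set(comp); for u in comp: for v,_ in graph.get(u,[]): nxt.add(v)
def satStep (d : PySem.Dict Int (List (Int × Int))) (comp : PySem.Set Int) : PySem.Set Int :=
  comp.foldl (fun nxt u => (pvAdj d u).foldl (fun nxt p => PySem.Set.add nxt p.1) nxt)
    (PySem.Set.ofList comp)

-- the 'while True:' loop; the Nat argument is a fuel guard only: the set grows on every
-- iteration that does not break, so with fuel pvFuel d the break is always reached first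
-- (proved below) and the 0-case is never hit.
def satLoop (d : PySem.Dict Int (List (Int × Int))) : Nat → PySem.Set Int → PySem.Set Int
  | 0, comp => comp
  | f + 1, comp =>
    let nxt := satStep d comp
    if PySem.Set.len nxt = PySem.Set.len comp then comp else satLoop d f nxt

def es_arbol_alt (graph : List (Int × List (Int × Int))) (es_dirigido : Bool) : Bool × String :=
  if es_dirigido then (false, "Los árboles (en este contexto) son grafos no dirigidos.")
  else
    let d := PySem.Dict.ofList graph
    let nodos := PySem.Dict.keys d
    match nodos with
    | [] => (true, "Grafo vacío es trivialmente un árbol (o bosque vacío).")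
    | n0 :: rest =>
      let nodos := n0 :: rest
      let comp := satLoop d (pvFuel d) (PySem.Set.add PySem.Set.empty n0)
      if comp.length ≠ nodos.length then (false, "El grafo no es conexo.")
      else
        -- num_aristas = sum(len(graph[u]) for u in graph) // 2
        let num := PySem.Int.floordiv ((nodos.map (fun u => ((pvAdj d u).length : Int))).sum) 2
        if num ≠ (nodos.length : Int) - 1 then
          (false, "Número de aristas incorrecto. Tiene " ++ PySem.Int.toStr num ++
            ", debería tener " ++ PySem.Int.toStr ((nodos.length : Int) - 1) ++ ".")
        else (true, "Es un árbol.")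

-- ===== PRECONDITION & SPEC =====
def Spec_es_arbol (graph : List (Int × List (Int × Int))) (es_dirigido : Bool) (out : Bool × String) : Prop := out = es_arbol_alt graph es_dirigido
instance (graph : List (Int × List (Int × Int))) (es_dirigido : Bool) (out : Bool × String) : Decidable (Spec_es_arbol graph es_dirigido out) := by unfold Spec_es_arbol; infer_instance

-- ===== CLAIM (what is proved, stated in full; the proofs are below) =====
def Claim_equal_es_arbol : Prop := ∀ (graph : List (Int × List (Int × Int))) (es_dirigido : Bool), Dom_es_arbol graph es_dirigido → Spec_es_arbol graph es_dirigido (es_arbol graph es_dirigido)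

-- ===== LEMMAS AND PROOFS =====

-- directed reachability from s, following graph.get(·,[]) exactly as both traversals do
inductive pvReach (d : PySem.Dict Int (List (Int × Int))) (s : Int) : Int → Prop
  | refl : pvReach d s s
  | step {u v w : Int} : pvReach d s u → (v, w) ∈ pvAdj d u → pvReach d s v

-- every neighbour entry lies in pvUg
lemma pvAdj_mem_pvUg (d : PySem.Dict Int (List (Int × Int))) (n : Int) {p : Int × Int}
    (hp : p ∈ pvAdj d n) : p.1 ∈ pvUg d := by
  unfold pvAdj PySem.Dict.getD at hp
  cases h : PySem.Dict.get? d n with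
  | none => rw [h] at hp; simp at hp
  | some l =>
    rw [h] at hp; simp at hp
    have := PySem.Dict.mem_items_of_get?_eq_some d h
    exact List.mem_flatMap.mpr ⟨(n, l), this, List.mem_map.mpr ⟨p, hp, rfl⟩⟩

-- the nodes the inner BFS fold appends, in order
def pvFresh : List (Int × Int) → PySem.Set Int → List Int
  | [], _ => []
  | p :: l, v =>
    if PySem.Set.contains v p.1 then pvFresh l v
    else p.1 :: pvFresh l (v ++ [p.1])

lemma bfs_fold_eq :
    ∀ (l : List (Int × Int)) (q : List Int) (v : PySem.Set Int),
      l.foldl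
        (fun st p =>
          if PySem.Set.contains st.2.1 p.1 then st
          else (st.1 ++ [p.1], PySem.Set.add st.2.1 p.1, PySem.Set.add st.2.2 p.1))
        (q, v, v) = (q ++ pvFresh l v, v ++ pvFresh l v, v ++ pvFresh l v) := by
  intro l
  induction l with
  | nil => intro q v; simp [pvFresh]
  | cons p l ih =>
    intro q v
    by_cases h : PySem.Set.contains v p.1
    · simp only [List.foldl_cons, pvFresh, h, if_true, ih]
    · have hnm : p.1 ∉ v := fun hm => h ((PySem.Set.contains_iff v p.1).mpr hm)
      simp only [List.foldl_cons, pvFresh, h, Bool.false_eq_true, if_false,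
        PySem.Set.add_of_not_mem hnm, ih, List.append_assoc, List.singleton_append]

lemma pvFresh_not_mem : ∀ (l : List (Int × Int)) (v : PySem.Set Int) (x : Int),
    x ∈ pvFresh l v → x ∉ v := by
  intro l
  induction l with
  | nil => intro v x hx; simp [pvFresh] at hx
  | cons p l ih =>
    intro v x hx
    by_cases h : PySem.Set.contains v p.1
    · simp only [pvFresh, h, if_true] at hx; exact ih v x hx
    · simp only [pvFresh, h, Bool.false_eq_true, if_false, List.mem_cons] at hx
      rcases hx with rfl | hx
      · exact fun hm => h ((PySem.Set.contains_iff v p.1).mpr hm)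
      · intro hm; exact ih _ x hx (by simp [hm])

lemma pvFresh_nodup : ∀ (l : List (Int × Int)) (v : PySem.Set Int), (pvFresh l v).Nodup := by
  intro l
  induction l with
  | nil => intro v; simp [pvFresh]
  | cons p l ih =>
    intro v
    by_cases h : PySem.Set.contains v p.1
    · simp only [pvFresh, h, if_true]; exact ih v
    · simp only [pvFresh, h, Bool.false_eq_true, if_false, List.nodup_cons]
      exact ⟨fun hm => pvFresh_not_mem l _ _ hm (by simp), ih _⟩

lemma pvFresh_source : ∀ (l : List (Int × Int)) (v : PySem.Set Int) (x : Int),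
    x ∈ pvFresh l v → ∃ w, (x, w) ∈ l := by
  intro l
  induction l with
  | nil => intro v x hx; simp [pvFresh] at hx
  | cons p l ih =>
    intro v x hx
    by_cases h : PySem.Set.contains v p.1
    · simp only [pvFresh, h, if_true] at hx
      obtain ⟨w, hw⟩ := ih v x hx; exact ⟨w, List.mem_cons_of_mem _ hw⟩
    · simp only [pvFresh, h, Bool.false_eq_true, if_false, List.mem_cons] at hx
      rcases hx with rfl | hx
      · exact ⟨p.2, by simp⟩
      · obtain ⟨w, hw⟩ := ih _ x hx; exact ⟨w, List.mem_cons_of_mem _ hw⟩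

lemma pvFresh_covers : ∀ (l : List (Int × Int)) (v : PySem.Set Int) (p : Int × Int),
    p ∈ l → p.1 ∈ v ++ pvFresh l v := by
  intro l
  induction l with
  | nil => intro v p hp; simp at hp
  | cons a l ih =>
    intro v p hp
    by_cases h : PySem.Set.contains v a.1
    · simp only [pvFresh, h, if_true]
      rcases List.mem_cons.mp hp with rfl | hp
      · exact List.mem_append_left _ ((PySem.Set.contains_iff v p.1).mp h)
      · exact ih v p hp
    · simp only [pvFresh, h, Bool.false_eq_true, if_false]
      rcases List.mem_cons.mp hp with rfl | hp
      · simp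
      · have := ih (v ++ [a.1]) p hp
        simp only [List.mem_append, List.mem_cons] at this ⊢
        tauto

-- counting: removing the fresh distinct nodes from the unvisited part of pvUg
lemma filter_drop (Ug t vis : List Int) (ht : t.Nodup) (hsub : ∀ x ∈ t, x ∈ Ug)
    (hdis : ∀ x ∈ t, x ∉ vis) :
    (Ug.filter (fun y => decide (y ∉ vis ++ t))).length + t.length ≤
      (Ug.filter (fun y => decide (y ∉ vis))).length := by
  set l := Ug.filter (fun y => decide (y ∉ vis)) with hl
  have hsplit : (l.filter (fun y => decide (y ∉ t))).length +
      (l.filter (fun y => !decide (y ∉ t))).length = l.length :=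
    Eq.symm (List.length_eq_length_filter_add _)
  have heq : Ug.filter (fun y => decide (y ∉ vis ++ t)) = l.filter (fun y => decide (y ∉ t)) := by
    rw [hl, List.filter_filter]
    apply List.filter_congr
    intro x _
    simp [List.mem_append, not_or, Bool.and_comm]
  have htsub : List.Subperm t l := by
    apply List.subperm_of_subset ht
    intro x hx
    rw [hl, List.mem_filter]
    exact ⟨hsub x hx, by simpa using hdis x hx⟩
  have hfil : List.Subperm (t.filter (fun y => !decide (y ∉ t))) (l.filter (fun y => !decide (y ∉ t))) :=
    List.Subperm.filter _ htsub
  have hts : t.filter (fun y => !decide (y ∉ t)) = t := by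
    apply List.filter_eq_self.mpr; intro x hx; simpa using hx
  rw [hts] at hfil
  have := List.Subperm.length_le hfil
  rw [heq]
  omega

-- main BFS invariant lemma
lemma bfsGo_spec (d : PySem.Dict Int (List (Int × Int))) (s : Int) :
    ∀ (f : Nat) (q : List Int) (vis : PySem.Set Int),
      vis.Nodup →
      (∀ x ∈ q, x ∈ vis) →
      (∀ x ∈ vis, x ∈ q ∨ ∀ p ∈ pvAdj d x, p.1 ∈ vis) →
      (∀ x ∈ vis, pvReach d s x) →
      q.length + ((pvUg d).filter (fun y => decide (y ∉ vis))).length ≤ f →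
      ∃ w, bfsGo d f q vis vis = (w, w) ∧ w.Nodup ∧ (∀ x ∈ vis, x ∈ w) ∧
        (∀ x ∈ w, pvReach d s x) ∧ (∀ x ∈ w, ∀ p ∈ pvAdj d x, p.1 ∈ w) := by
  intro f
  induction f with
  | zero =>
    intro q vis hnd hq hinv hsnd hfuel
    have hqnil : q = [] := List.length_eq_zero_iff.mp (by omega)
    subst hqnil
    exact ⟨vis, rfl, hnd, fun x hx => hx, hsnd,
      fun x hx => (hinv x hx).resolve_left (by simp)⟩
  | succ f ih =>
    intro q vis hnd hq hinv hsnd hfuel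
    cases q with
    | nil =>
      exact ⟨vis, rfl, hnd, fun x hx => hx, hsnd,
        fun x hx => (hinv x hx).resolve_left (by simp)⟩
    | cons n rest =>
      have hred : bfsGo d (f + 1) (n :: rest) vis vis =
          bfsGo d f (rest ++ pvFresh (pvAdj d n) vis) (vis ++ pvFresh (pvAdj d n) vis)
            (vis ++ pvFresh (pvAdj d n) vis) := by
        simp only [bfsGo, bfs_fold_eq]
      set t := pvFresh (pvAdj d n) vis with hT
      have htn : t.Nodup := pvFresh_nodup _ _
      have htv : ∀ x ∈ t, x ∉ vis := fun x hx => pvFresh_not_mem _ _ _ hx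
      have htsrc : ∀ x ∈ t, ∃ w, (x, w) ∈ pvAdj d n := fun x hx => pvFresh_source _ _ _ hx
      have htUg : ∀ x ∈ t, x ∈ pvUg d := by
        intro x hx
        obtain ⟨w, hw⟩ := htsrc x hx
        exact pvAdj_mem_pvUg d n hw
      have hnvis : n ∈ vis := hq n (by simp)
      obtain ⟨w, hw, hwnd, hwsub, hwsnd, hwcl⟩ :=
        ih (rest ++ t) (vis ++ t)
          (by
            refine List.Nodup.append hnd htn ?_
            intro x hxv hxt; exact htv x hxt hxv)
          (by
            intro x hx
            rcases List.mem_append.mp hx with hx | hx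
            · exact List.mem_append_left _ (hq x (by simp [hx]))
            · exact List.mem_append_right _ hx)
          (by
            intro x hx
            rcases List.mem_append.mp hx with hx | hx
            · rcases hinv x hx with hxq | hcl
              · rcases List.mem_cons.mp hxq with rfl | hxr
                · right; intro p hp; rw [hT]; exact pvFresh_covers _ _ p hp
                · left; exact List.mem_append_left _ hxr
              · right; intro p hp; exact List.mem_append_left _ (hcl p hp)
            · left; exact List.mem_append_right _ hx)
          (by
            intro x hx
            rcases List.mem_append.mp hx with hx | hx
            · exact hsnd x hx
            · obtain ⟨wt, hwt⟩ := htsrc x hx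
              exact pvReach.step (hsnd n hnvis) hwt)
          (by
            have hdrop := filter_drop (pvUg d) t vis htn htUg htv
            simp only [List.length_append, List.length_cons] at hfuel ⊢
            omega)
      refine ⟨w, ?_, hwnd, ?_, hwsnd, hwcl⟩
      · rw [hred]; exact hw
      · intro x hx; exact hwsub x (List.mem_append_left _ hx)

lemma inner_fold_mem : ∀ (l : List (Int × Int)) (acc : PySem.Set Int) (x : Int),
    x ∈ l.foldl (fun nxt p => PySem.Set.add nxt p.1) acc ↔ x ∈ acc ∨ ∃ w, (x, w) ∈ l := by
  intro l
  induction l with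
  | nil => intro acc x; simp
  | cons a l ih =>
    intro acc x
    simp only [List.foldl_cons, ih, PySem.Set.mem_add, List.mem_cons]
    constructor
    · rintro ((hx | rfl) | ⟨w, hw⟩)
      · exact Or.inl hx
      · exact Or.inr ⟨a.2, Or.inl rfl⟩
      · exact Or.inr ⟨w, Or.inr hw⟩
    · rintro (hx | ⟨w, (heq | hw)⟩)
      · exact Or.inl (Or.inl hx)
      · exact Or.inl (Or.inr (congrArg Prod.fst heq))
      · exact Or.inr ⟨w, hw⟩

lemma inner_fold_nodup : ∀ (l : List (Int × Int)) (acc : PySem.Set Int), acc.Nodup →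
    (l.foldl (fun nxt p => PySem.Set.add nxt p.1) acc).Nodup := by
  intro l
  induction l with
  | nil => intro acc h; exact h
  | cons a l ih =>
    intro acc h
    exact ih _ (by exact PySem.Set.nodup_add acc a.1 h)

lemma outer_fold_mem (d : PySem.Dict Int (List (Int × Int))) :
    ∀ (l : List Int) (acc : PySem.Set Int) (x : Int),
      x ∈ l.foldl (fun nxt u => (pvAdj d u).foldl (fun nxt p => PySem.Set.add nxt p.1) nxt) acc ↔
        x ∈ acc ∨ ∃ u ∈ l, ∃ w, (x, w) ∈ pvAdj d u := by
  intro l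
  induction l with
  | nil => intro acc x; simp
  | cons a l ih =>
    intro acc x
    simp only [List.foldl_cons, ih, inner_fold_mem, List.mem_cons]
    constructor
    · rintro ((hx | ⟨w, hw⟩) | ⟨u, hu, w, hw⟩)
      · exact Or.inl hx
      · exact Or.inr ⟨a, Or.inl rfl, w, hw⟩
      · exact Or.inr ⟨u, Or.inr hu, w, hw⟩
    · rintro (hx | ⟨u, (rfl | hu), w, hw⟩)
      · exact Or.inl (Or.inl hx)
      · exact Or.inl (Or.inr ⟨w, hw⟩)
      · exact Or.inr ⟨u, hu, w, hw⟩

lemma satStep_mem (d : PySem.Dict Int (List (Int × Int))) (comp : PySem.Set Int) (x : Int) :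
    x ∈ satStep d comp ↔ x ∈ comp ∨ ∃ u ∈ comp, ∃ w, (x, w) ∈ pvAdj d u := by
  unfold satStep
  rw [outer_fold_mem, PySem.Set.mem_ofList]

lemma satStep_nodup (d : PySem.Dict Int (List (Int × Int))) (comp : PySem.Set Int) :
    (satStep d comp).Nodup := by
  unfold satStep
  generalize hacc : PySem.Set.ofList comp = acc
  have hnd : acc.Nodup := hacc ▸ PySem.Set.nodup_ofList comp
  clear hacc
  induction comp generalizing acc with
  | nil => exact hnd
  | cons a l ih => exact ih _ (inner_fold_nodup _ _ hnd)

-- main saturation invariant lemma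
lemma satLoop_spec (d : PySem.Dict Int (List (Int × Int))) (s : Int) :
    ∀ (f : Nat) (comp : PySem.Set Int),
      comp.Nodup →
      (∀ x ∈ comp, x = s ∨ x ∈ pvUg d) →
      (∀ x ∈ comp, pvReach d s x) →
      (pvUg d).length + 2 ≤ f + comp.length →
      (satLoop d f comp).Nodup ∧ (∀ x ∈ comp, x ∈ satLoop d f comp) ∧
        (∀ x ∈ satLoop d f comp, pvReach d s x) ∧
        (∀ x ∈ satLoop d f comp, ∀ p ∈ pvAdj d x, p.1 ∈ satLoop d f comp) := by
  intro f
  induction f with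
  | zero =>
    intro comp hnd huniv _ hfuel
    exfalso
    have hsub : comp ⊆ s :: pvUg d := by
      intro x hx
      rcases huniv x hx with rfl | hx
      · exact List.mem_cons_self
      · exact List.mem_cons_of_mem _ hx
    have := List.Subperm.length_le (List.subperm_of_subset hnd hsub)
    simp only [List.length_cons] at this
    omega
  | succ f ih =>
    intro comp hnd huniv hsnd hfuel
    have hsub : ∀ x ∈ comp, x ∈ satStep d comp :=
      fun x hx => (satStep_mem d comp x).mpr (Or.inl hx)
    have hsp : List.Subperm comp (satStep d comp) := List.subperm_of_subset hnd hsub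
    by_cases h : (satStep d comp).length = comp.length
    · have hloop : satLoop d (f + 1) comp = comp := by
        simp only [satLoop, PySem.Set.len_eq, h]
        simp
      have hperm : comp.Perm (satStep d comp) :=
        List.Subperm.perm_of_length_le hsp (by omega)
      rw [hloop]
      refine ⟨hnd, fun x hx => hx, hsnd, ?_⟩
      intro x hx p hp
      have : p.1 ∈ satStep d comp :=
        (satStep_mem d comp p.1).mpr (Or.inr ⟨x, hx, p.2, by simpa using hp⟩)
      exact hperm.mem_iff.mpr this
    · have hloop : satLoop d (f + 1) comp = satLoop d f (satStep d comp) := by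
        simp only [satLoop, PySem.Set.len_eq]
        simp [h]
      have hgt : comp.length < (satStep d comp).length :=
        lt_of_le_of_ne (List.Subperm.length_le hsp) (fun he => h he.symm)
      obtain ⟨h1, h2, h3, h4⟩ :=
        ih (satStep d comp) (satStep_nodup d comp)
          (by
            intro x hx
            rcases (satStep_mem d comp x).mp hx with hx | ⟨u, _, w, hw⟩
            · exact huniv x hx
            · exact Or.inr (pvAdj_mem_pvUg d u hw))
          (by
            intro x hx
            rcases (satStep_mem d comp x).mp hx with hx | ⟨u, hu, w, hw⟩
            · exact hsnd x hx
            · exact pvReach.step (hsnd u hu) hw)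
          (by omega)
      rw [hloop]
      exact ⟨h1, fun x hx => h2 x (hsub x hx), h3, h4⟩

lemma reach_mem_of_closed (d : PySem.Dict Int (List (Int × Int))) (s : Int) (w : List Int)
    (hs : s ∈ w) (hcl : ∀ x ∈ w, ∀ p ∈ pvAdj d x, p.1 ∈ w) :
    ∀ x, pvReach d s x → x ∈ w := by
  intro x hx
  induction hx with
  | refl => exact hs
  | step _ hp ih => exact hcl _ ih _ hp

-- the two traversals compute sets of the same size
lemma comp_length_eq (d : PySem.Dict Int (List (Int × Int))) (n0 : Int) :
    (bfs_componentes d n0 PySem.Set.empty).length =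
      (satLoop d (pvFuel d) (PySem.Set.add PySem.Set.empty n0)).length := by
  have hadd : PySem.Set.add PySem.Set.empty n0 = [n0] := by
    rw [PySem.Set.add_of_not_mem (by simp [PySem.Set.empty])]
    simp [PySem.Set.empty]
  obtain ⟨w, hw, hwnd, hwsub, hwsnd, hwcl⟩ :=
    bfsGo_spec d n0 (pvFuel d) [n0] [n0]
      (by simp)
      (by intro x hx; exact hx)
      (by intro x hx; exact Or.inl hx)
      (by intro x hx; simp only [List.mem_singleton] at hx; subst hx; exact pvReach.refl)
      (by
        have := List.length_filter_le (fun y => decide (y ∉ ([n0] : List Int))) (pvUg d)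
        simp only [List.length_singleton, pvFuel]
        omega)
  obtain ⟨h1, h2, h3, h4⟩ :=
    satLoop_spec d n0 (pvFuel d) [n0]
      (by simp)
      (by intro x hx; simp only [List.mem_singleton] at hx; exact Or.inl hx)
      (by intro x hx; simp only [List.mem_singleton] at hx; subst hx; exact pvReach.refl)
      (by simp only [List.length_singleton, pvFuel]; omega)
  have hbfs : bfs_componentes d n0 PySem.Set.empty = w := by
    unfold bfs_componentes
    simp only [hadd]
    rw [hw]
  rw [hbfs, hadd]
  have hmemw : ∀ x, x ∈ w ↔ pvReach d n0 x := by
    intro x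
    exact ⟨fun hx => hwsnd x hx,
      fun hx => reach_mem_of_closed d n0 w (hwsub n0 (by simp)) hwcl x hx⟩
  have hmemw' : ∀ x, x ∈ satLoop d (pvFuel d) [n0] ↔ pvReach d n0 x := by
    intro x
    exact ⟨fun hx => h3 x hx,
      fun hx => reach_mem_of_closed d n0 _ (h2 n0 (by simp)) h4 x hx⟩
  exact List.Perm.length_eq
    ((List.perm_ext_iff_of_nodup hwnd h1).mpr (fun x => (hmemw x).trans (hmemw' x).symm))

-- the two edge counts agree
lemma num_eq (d : PySem.Dict Int (List (Int × Int))) (nodos : List Int) :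
    nodos.foldl (fun acc u => acc + ((pvAdj d u).length : Int)) 0 =
      (nodos.map (fun u => ((pvAdj d u).length : Int))).sum := by
  have h := PySem.List.foldl_add nodos (fun u => ((pvAdj d u).length : Int)) 0
  simpa using h

-- ===== VERDICT (by name: the statement is the Claim_ definition above) =====
theorem es_arbol_spec : Claim_equal_es_arbol := by
  intro graph es_dirigido _
  unfold Spec_es_arbol es_arbol es_arbol_alt
  cases es_dirigido with
  | true => rfl
  | false =>
    simp only [Bool.false_eq_true, if_false]
    cases hk : PySem.Dict.keys (PySem.Dict.ofList graph) with
    | nil => rfl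
    | cons n0 rest =>
      have hlen := comp_length_eq (PySem.Dict.ofList graph) n0
      have hnum := num_eq (PySem.Dict.ofList graph) (n0 :: rest)
      simp only [hlen, hnum]
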